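-- pv_equiv track=rewrite | github.com/kristen-schneider/genosis | python/scripts/utils.py | count_unique_segemnts_in_region
-- ===== SOURCE A (Python) =====
-- def count_unique_segemnts_in_region(segments):
--     numSegments = len(segments[0])
--     unique = [[i] for i in segments[0]]
--
--     for sample in range(len(segments)):
--         curr_sample = segments[sample]
--         for segment in range(numSegments):
--             curr_segment = curr_sample[segment]
--             if curr_segment not in unique[segment]:
--                 unique[segment].append(curr_segment)
--
--     return unique
-- ===== SOURCE B (Python) =====
-- def count_unique_segemnts_in_region(segments):
--     n = len(segments[0])
--
--     def nub(col):
--         # order-preserving dedup by recursive filtering: keep the head, strip all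
--         # later copies of it from the rest, recurse on what is left
--         if not col:
--             return []
--         head = col[0]
--         return [head] + nub([v for v in col[1:] if v != head])
--
--     return [nub(list(col)) for col in zip(*(row[:n] for row in segments))]
-- ===== Notes on version B (the rewrite author's own statement) =====
-- stated objective: alternative
-- what changed: B transposes the matrix with zip(*rows) and deduplicates each column by a recursive filter-out-later-copies scheme (keep head, delete all its later occurrences, recurse on the remainder), instead of A's row-by-row incremental appends guarded by membership scans of the growing per-segment unique lists.
import Mathlib
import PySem

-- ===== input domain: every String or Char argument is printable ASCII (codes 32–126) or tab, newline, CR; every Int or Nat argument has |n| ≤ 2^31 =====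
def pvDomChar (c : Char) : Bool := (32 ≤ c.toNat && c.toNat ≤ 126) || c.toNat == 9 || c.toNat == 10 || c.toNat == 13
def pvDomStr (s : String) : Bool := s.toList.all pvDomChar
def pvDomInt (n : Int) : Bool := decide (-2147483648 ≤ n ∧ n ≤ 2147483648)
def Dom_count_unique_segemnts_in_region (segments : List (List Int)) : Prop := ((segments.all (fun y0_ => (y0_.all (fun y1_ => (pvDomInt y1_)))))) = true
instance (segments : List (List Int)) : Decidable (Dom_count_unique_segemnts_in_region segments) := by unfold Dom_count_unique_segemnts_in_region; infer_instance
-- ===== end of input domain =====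

-- B transposes the matrix and deduplicates each column by recursive filter-out-later-copies,
-- instead of A's row-by-row membership-scan appends (alternative algorithm, similar cost);
-- equivalence proved on nonempty inputs whose rows are at least as long as the first row
-- (elsewhere A raises IndexError).


-- ===== PORT A =====
def count_unique_segemnts_in_region (segments : List (List Int)) : List (List Int) :=
  match PySem.List.pyGet? segments 0 with
  | none => []  -- segments[0] raises IndexError in Python; excluded by Pre_
  | some row0 =>
    let numSegments : Int := (row0.length : Int)
    let unique0 : List (List Int) := row0.map (fun i => [i])
    (PySem.List.pyRange 0 (segments.length : Int) 1).foldl (fun unique sample =>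
      let curr_sample := PySem.List.pyGetD segments sample []
      (PySem.List.pyRange 0 numSegments 1).foldl (fun unique segment =>
        -- curr_sample[segment] raises IndexError on rows shorter than row0; excluded by Pre_
        let curr_segment := PySem.List.pyGetD curr_sample segment 0
        let u := PySem.List.pyGetD unique segment []
        if curr_segment ∈ u then unique
        else PySem.List.pySetD unique segment (u ++ [curr_segment])) unique) unique0

-- ===== PORT B =====
-- Source B's nub: keep the head, filter all its later copies out of the rest, recurse;
-- the Nat fuel (initially the list length, which the recursion never exhausts) only
-- makes the recursion structural
def pvNubGo (fuel : Nat) (col : List Int) : List Int :=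
  match fuel, col with
  | _, [] => []
  | 0, _ => []
  | fuel + 1, head :: rest => head :: pvNubGo fuel (rest.filter (fun v => v ≠ head))

def pvNub (col : List Int) : List Int := pvNubGo col.length col

def count_unique_segemnts_in_region_alt (segments : List (List Int)) : List (List Int) :=
  match segments with
  | [] => []  -- len(segments[0]) raises IndexError in Python; excluded by Pre_
  | row0 :: _ =>
    let n := row0.length
    let trimmed := segments.map (fun row => row.take n)      -- row[:n]
    let k := (trimmed.map List.length).foldl min n           -- zip(*…) stops at the shortest row
    (List.range k).map (fun j => pvNub (trimmed.map (fun row => row.getD j 0)))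

-- ===== PRECONDITION & SPEC =====
-- Pre_ excludes exactly the inputs on which A raises IndexError: the empty list and
-- inputs with a row shorter than the first row.
def Pre_count_unique_segemnts_in_region (segments : List (List Int)) : Prop :=
  segments ≠ [] ∧ ∀ row ∈ segments, (segments.headD []).length ≤ row.length
instance (segments : List (List Int)) : Decidable (Pre_count_unique_segemnts_in_region segments) := by unfold Pre_count_unique_segemnts_in_region; infer_instance
def pvWitness_count_unique_segemnts_in_region : List (List Int) := [[1, 2], [1, 3], [2, 2, 9]]
def Spec_count_unique_segemnts_in_region (segments : List (List Int)) (out : List (List Int)) : Prop := out = count_unique_segemnts_in_region_alt segments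
instance (segments : List (List Int)) (out : List (List Int)) : Decidable (Spec_count_unique_segemnts_in_region segments out) := by unfold Spec_count_unique_segemnts_in_region; infer_instance

-- ===== CLAIM (what is proved, stated in full; the proofs are below) =====
def Claim_equal_count_unique_segemnts_in_region : Prop := ∀ (segments : List (List Int)), Dom_count_unique_segemnts_in_region segments → Pre_count_unique_segemnts_in_region segments → Spec_count_unique_segemnts_in_region segments (count_unique_segemnts_in_region segments)

-- ===== LEMMAS AND PROOFS =====

-- A's inner-loop body, with curr_sample fixed
def pvStep (curr : List Int) (u : List (List Int)) (segment : Int) : List (List Int) :=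
  let c := PySem.List.pyGetD curr segment 0
  let s := PySem.List.pyGetD u segment []
  if c ∈ s then u else PySem.List.pySetD u segment (s ++ [c])

lemma pvAdd_mem {s : List Int} {x : Int} (h : x ∈ s) : PySem.Set.add s x = s := by
  simp [PySem.Set.add, PySem.Set.contains, h]

lemma pvAdd_not_mem {s : List Int} {x : Int} (h : x ∉ s) : PySem.Set.add s x = s ++ [x] := by
  simp [PySem.Set.add, PySem.Set.contains, h]

lemma pvInner_eq (curr : List Int) (n : Nat) (g : Nat → List Int) :
    ∀ (m : Nat), m ≤ n →
    List.foldl (pvStep curr) ((List.range n).map g) (PySem.List.pyRange 0 (m : Int)) =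
      (List.range n).map (fun j => if j < m then PySem.Set.add (g j) (curr.getD j 0) else g j) := by
  intro m
  induction m with
  | zero => intro _; simp [PySem.List.pyRange]
  | succ m ih =>
    intro hm
    have hm' : m ≤ n := Nat.le_of_succ_le hm
    have hmn : m < n := hm
    have hcast : ((m + 1 : Nat) : Int) = (m : Int) + 1 := by push_cast; ring
    rw [hcast, PySem.List.pyRange_one_succ_right (by exact_mod_cast Nat.zero_le m),
        List.foldl_append, ih hm']
    simp only [List.foldl_cons, List.foldl_nil]
    have hget : PySem.List.pyGetD
        ((List.range n).map (fun j => if j < m then PySem.Set.add (g j) (curr.getD j 0) else g j))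
        (m : Int) [] = g m := by
      rw [PySem.List.pyGetD_natCast]
      simp [List.getD, List.getElem?_map, List.getElem?_range hmn]
    have hcurr : PySem.List.pyGetD curr (m : Int) 0 = curr.getD m 0 :=
      PySem.List.pyGetD_natCast curr m 0
    simp only [pvStep, hget, hcurr]
    by_cases hmem : curr.getD m 0 ∈ g m
    · rw [if_pos hmem]
      apply List.map_congr_left
      intro j hj
      by_cases h : j < m
      · rw [if_pos h, if_pos (Nat.lt_succ_of_lt h)]
      · by_cases h2 : j < m + 1
        · have hje : j = m := by omega
          subst hje
          rw [if_neg h, if_pos h2, pvAdd_mem hmem]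
        · rw [if_neg h, if_neg h2]
    · rw [if_neg hmem]
      have hlen : m < ((List.range n).map
          (fun j => if j < m then PySem.Set.add (g j) (curr.getD j 0) else g j)).length := by
        simpa using hmn
      rw [PySem.List.pySetD, PySem.List.pySet?_natCast _ _ _ hlen]
      simp only [Option.getD_some]
      apply List.ext_getElem
      · simp
      · intro j hj1 hj2
        have hjn : j < n := by simpa using hj2
        simp only [List.getElem_set, List.getElem_map, List.getElem_range]
        by_cases hje : m = j
        · subst hje
          rw [if_pos rfl, if_pos (Nat.lt_succ_self m), pvAdd_not_mem hmem]
        · rw [if_neg hje]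
          by_cases h : j < m
          · rw [if_pos h, if_pos (Nat.lt_succ_of_lt h)]
          · rw [if_neg h, if_neg (by omega : ¬ j < m + 1)]

lemma pvOuter_eq (n : Nat) :
    ∀ (ss : List (List Int)) (g : Nat → List Int), (∀ r ∈ ss, n ≤ r.length) →
    List.foldl (fun u curr => List.foldl (pvStep curr) u (PySem.List.pyRange 0 (n : Int)))
        ((List.range n).map g) ss =
      (List.range n).map
        (fun j => ss.foldl (fun s r => PySem.Set.add s (r.getD j 0)) (g j)) := by
  intro ss
  induction ss with
  | nil => intro g _; simp
  | cons r rest ih =>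
    intro g h
    simp only [List.foldl_cons]
    rw [pvInner_eq r n g n (Nat.le_refl n)]
    have hrw : (List.range n).map (fun j => if j < n then PySem.Set.add (g j) (r.getD j 0) else g j)
        = (List.range n).map (fun j => PySem.Set.add (g j) (r.getD j 0)) := by
      apply List.map_congr_left
      intro j hj
      rw [if_pos (List.mem_range.mp hj)]
    rw [hrw, ih (fun j => PySem.Set.add (g j) (r.getD j 0)) (fun x hx => h x (List.mem_cons_of_mem r hx))]

lemma pvPortA_eq (row0 : List Int) (rest : List (List Int)) :
    count_unique_segemnts_in_region (row0 :: rest) =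
      List.foldl (fun u curr => List.foldl (pvStep curr) u (PySem.List.pyRange 0 (row0.length : Int)))
        (row0.map (fun i => [i])) (row0 :: rest) := by
  have h0 : PySem.List.pyGet? (row0 :: rest) (0 : Int) = some row0 := by
    simp [PySem.List.pyGet?, PySem.List.pyIdx?]
  unfold count_unique_segemnts_in_region
  rw [h0]
  exact PySem.List.foldl_pyRange_zero_pyGetD' (row0 :: rest) []
    (fun u curr => List.foldl (pvStep curr) u (PySem.List.pyRange 0 (row0.length : Int))) _

lemma pvMapSingleton (row0 : List Int) :
    row0.map (fun i => [i]) = (List.range row0.length).map (fun j => [row0.getD j 0]) := by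
  apply List.ext_getElem
  · simp
  · intro j h1 h2
    have hj : j < row0.length := by simpa using h1
    simp [List.getD_eq_getElem?_getD, List.getElem?_eq_getElem hj]

lemma pvFoldlMin (n : Nat) : ∀ (l : List Nat), (∀ x ∈ l, x = n) → l.foldl min n = n := by
  intro l
  induction l with
  | nil => intro _; rfl
  | cons x xs ih =>
    intro h
    have hx : x = n := h x (List.mem_cons_self)
    simp only [List.foldl_cons, hx, min_self]
    exact ih (fun y hy => h y (List.mem_cons_of_mem x hy))

lemma pvGetD_take (r : List Int) (n j : Nat) (hj : j < n) :
    (r.take n).getD j 0 = r.getD j 0 := by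
  simp [List.getD_eq_getElem?_getD, hj]

-- fuel irrelevance for pvNubGo: any fuel at least the length gives the same result
lemma pvNubGo_congr : ∀ (n m : Nat) (l : List Int), l.length ≤ n → l.length ≤ m →
    pvNubGo n l = pvNubGo m l := by
  intro n
  induction n with
  | zero =>
    intro m l hn _
    have : l = [] := List.eq_nil_of_length_eq_zero (Nat.le_zero.mp hn)
    subst this
    cases m <;> rfl
  | succ n ih =>
    intro m l hn hm
    match l with
    | [] => cases m <;> rfl
    | x :: xs =>
      match m, hm with
      | m + 1, hm =>
        simp only [pvNubGo]
        have hxn : (xs.filter (fun v => v ≠ x)).length ≤ n :=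
          le_trans (List.length_filter_le _ _) (by simpa using Nat.succ_le_succ_iff.mp hn)
        have hxm : (xs.filter (fun v => v ≠ x)).length ≤ m :=
          le_trans (List.length_filter_le _ _) (by simpa using Nat.succ_le_succ_iff.mp hm)
        rw [ih _ _ hxn hxm]

-- the accumulator-membership fold of A computes the same column as B's filter-based nub
lemma pvNub_foldl (n : Nat) : ∀ (l : List Int), l.length ≤ n → ∀ (acc : List Int),
    List.foldl PySem.Set.add acc l = acc ++ pvNubGo n (l.filter (fun v => v ∉ acc)) := by
  induction n with
  | zero =>
    intro l hl acc
    have : l = [] := List.eq_nil_of_length_eq_zero (Nat.le_zero.mp hl)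
    subst this; simp [pvNubGo]
  | succ n ih =>
    intro l hl acc
    match l with
    | [] => simp [pvNubGo]
    | x :: xs =>
      have hxs : xs.length ≤ n := by simpa using Nat.succ_le_succ_iff.mp hl
      simp only [List.foldl_cons]
      by_cases hx : x ∈ acc
      · rw [pvAdd_mem hx, ih xs hxs acc]
        have hfc : (x :: xs).filter (fun v => v ∉ acc) = xs.filter (fun v => v ∉ acc) := by
          simp [hx]
        rw [hfc,
            pvNubGo_congr n (n + 1) _ (le_trans (List.length_filter_le _ _) hxs)
              (le_trans (List.length_filter_le _ _) (Nat.le_succ_of_le hxs))]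
      · rw [pvAdd_not_mem hx, ih xs hxs (acc ++ [x])]
        have hfc : (x :: xs).filter (fun v => v ∉ acc) = x :: xs.filter (fun v => v ∉ acc) := by
          simp [hx]
        rw [hfc]
        have hnub : pvNubGo (n + 1) (x :: xs.filter (fun v => v ∉ acc))
            = x :: pvNubGo n ((xs.filter (fun v => v ∉ acc)).filter (fun v => v ≠ x)) := by
          simp only [pvNubGo]
        have hff : (xs.filter (fun v => v ∉ acc)).filter (fun v => v ≠ x)
            = xs.filter (fun v => v ∉ acc ++ [x]) := by
          rw [List.filter_filter]
          apply List.filter_congr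
          intro v _
          simp [List.mem_append]
          exact Bool.and_comm _ _
        rw [hnub, hff, List.append_assoc]
        simp

-- ===== VERDICT (by name: the statement is the Claim_ definition above) =====
theorem count_unique_segemnts_in_region_spec : Claim_equal_count_unique_segemnts_in_region := by
  intro segments _ hpre
  obtain ⟨hne, hlen⟩ := hpre
  unfold Spec_count_unique_segemnts_in_region
  match segments, hne with
  | row0 :: rest, _ =>
    have hlen' : ∀ r ∈ (row0 :: rest), row0.length ≤ r.length := by
      intro r hr; exact hlen r hr
    rw [pvPortA_eq, pvMapSingleton, pvOuter_eq row0.length (row0 :: rest) _ hlen']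
    have halt : count_unique_segemnts_in_region_alt (row0 :: rest)
        = (List.range (List.foldl min row0.length
            (List.map List.length ((row0 :: rest).map (fun row => row.take row0.length))))).map
            (fun j => pvNub
              (((row0 :: rest).map (fun row => row.take row0.length)).map (fun row => row.getD j 0))) := rfl
    rw [halt]
    have htrim : List.foldl min row0.length
        (List.map List.length ((row0 :: rest).map (fun row => row.take row0.length))) = row0.length := by
      apply pvFoldlMin
      intro x hx
      simp only [List.map_map, List.mem_map, Function.comp] at hx
      obtain ⟨r, hr, hrx⟩ := hx
      have := hlen' r hr
      simp only [List.length_take] at hrx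
      omega
    rw [htrim]
    apply List.map_congr_left
    intro j hj
    have hjn : j < row0.length := List.mem_range.mp hj
    have hcol : ((row0 :: rest).map (fun row => row.take row0.length)).map (fun row => row.getD j 0)
        = (row0 :: rest).map (fun r => r.getD j 0) := by
      rw [List.map_map]
      apply List.map_congr_left
      intro r hr
      exact pvGetD_take r row0.length j hjn
    rw [hcol]
    -- A's column fold starts from [row0.getD j 0] and re-folds the whole column; B nubs the column
    have hA : List.foldl (fun s r => PySem.Set.add s (r.getD j 0)) [row0.getD j 0] (row0 :: rest)
        = List.foldl PySem.Set.add [] ((row0 :: rest).map (fun r => r.getD j 0)) := by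
      rw [List.foldl_map]
      simp only [List.foldl_cons]
      rw [pvAdd_not_mem (List.not_mem_nil), List.nil_append,
          pvAdd_mem (List.mem_singleton.mpr rfl)]
    rw [hA, pvNub_foldl ((row0 :: rest).map (fun r => r.getD j 0)).length _ (Nat.le_refl _) []]
    simp [pvNub]
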